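-- pv_equiv track=rewrite | github.com/nitin001singh/Data-Structure---Algorithm | OA/Program14.py | answer
-- ===== SOURCE A (Python) =====
-- def answer(nums):
--     n = len(nums)
--     c = 0
--     for i in range(n):
--         for j in range(i+1, n):
--             for k in range(j+1, n):
--                 if nums[i] > nums[j] < nums[k]:
--                     c += 1
--
--     return c
-- ===== SOURCE B (Python) =====
-- def answer(nums):
--     n = len(nums)
--     total = 0
--     for j in range(n):
--         vj = nums[j]
--         left = 0
--         for i in range(j):
--             if nums[i] > vj:
--                 left += 1
--         right = 0
--         for k in range(j + 1, n):
--             if nums[k] > vj: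
--                 right += 1
--         total += left * right
--     return total
-- ===== Notes on version B (the rewrite author's own statement) =====
-- stated objective: faster
-- what changed: Replaces A's O(n^3) brute-force enumeration of all triples by a per-middle-element pass that multiplies the count of larger elements on the left by the count of larger elements on the right, O(n^2).
import Mathlib
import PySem

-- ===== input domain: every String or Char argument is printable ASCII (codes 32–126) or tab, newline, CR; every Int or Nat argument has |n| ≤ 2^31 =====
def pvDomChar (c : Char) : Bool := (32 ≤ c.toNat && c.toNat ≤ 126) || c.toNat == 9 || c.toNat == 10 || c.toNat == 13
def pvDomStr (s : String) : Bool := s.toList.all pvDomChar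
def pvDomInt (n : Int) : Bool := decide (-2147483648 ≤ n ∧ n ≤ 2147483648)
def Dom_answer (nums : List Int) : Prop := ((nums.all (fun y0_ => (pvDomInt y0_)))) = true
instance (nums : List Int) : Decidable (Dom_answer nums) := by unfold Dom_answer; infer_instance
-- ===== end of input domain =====

-- B replaces A's O(n^3) triple loop by a per-middle-element product of left/right counts (O(n^2)); objective: faster.

-- ===== PORT A =====
def answer (nums : List Int) : Int :=
  let n : Int := (nums.length : Int)
  (PySem.List.pyRange 0 n 1).foldl (fun c i =>
    (PySem.List.pyRange (i + 1) n 1).foldl (fun c j =>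
      (PySem.List.pyRange (j + 1) n 1).foldl (fun c k =>
        if PySem.List.pyGetD nums i 0 > PySem.List.pyGetD nums j 0 ∧
           PySem.List.pyGetD nums j 0 < PySem.List.pyGetD nums k 0 then c + 1 else c) c) c) 0

-- ===== PORT B =====
def answer_alt (nums : List Int) : Int :=
  let n : Int := (nums.length : Int)
  (PySem.List.pyRange 0 n 1).foldl (fun total j =>
    let vj := PySem.List.pyGetD nums j 0
    let left := (PySem.List.pyRange 0 j 1).foldl
      (fun l i => if PySem.List.pyGetD nums i 0 > vj then l + 1 else l) 0
    let right := (PySem.List.pyRange (j + 1) n 1).foldl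
      (fun r k => if PySem.List.pyGetD nums k 0 > vj then r + 1 else r) 0
    total + left * right) 0

-- ===== PRECONDITION & SPEC =====
def Spec_answer (nums : List Int) (out : Int) : Prop := out = answer_alt nums
instance (nums : List Int) (out : Int) : Decidable (Spec_answer nums out) := by unfold Spec_answer; infer_instance

-- ===== CLAIM (what is proved, stated in full; the proofs are below) =====
def Claim_equal_answer : Prop := ∀ (nums : List Int), Dom_answer nums → Spec_answer nums (answer nums)

-- ===== LEMMAS AND PROOFS =====

-- A sum of f over list(range(a, b)) is the Finset sum over Ico a b.
theorem sum_pyRange (a b : Int) (f : Int → Int) :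
    ((PySem.List.pyRange a b 1).map f).sum = ∑ x ∈ Finset.Ico a b, f x := by
  by_cases h : b ≤ a
  · rw [PySem.List.pyRange_one_eq_nil h, Finset.Ico_eq_empty (by omega)]; simp
  · have h' : a < b := by omega
    have hnot : a ∉ Finset.Ico (a + 1) b := by simp
    have : (b - (a + 1)).toNat < (b - a).toNat := by omega
    rw [PySem.List.pyRange_one_cons h', List.map_cons, List.sum_cons,
        sum_pyRange (a + 1) b f, ← Finset.insert_Ico_add_one_left_eq_Ico h',
        Finset.sum_insert hnot]
termination_by (b - a).toNat

-- Swapping the two ways of summing over a ≤ i < j < b (Int version of Finset.sum_Ico_Ico_comm').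
theorem ico_swap (a b : Int) (f : Int → Int → Int) :
    (∑ i ∈ Finset.Ico a b, ∑ j ∈ Finset.Ico (i + 1) b, f i j)
      = ∑ j ∈ Finset.Ico a b, ∑ i ∈ Finset.Ico a j, f i j := by
  rw [Finset.sum_sigma', Finset.sum_sigma']
  refine Finset.sum_nbij' (fun x => ⟨x.2, x.1⟩) (fun x => ⟨x.2, x.1⟩) ?_ ?_ (fun _ _ => rfl)
    (fun _ _ => rfl) (fun _ _ => rfl) <;>
  simp only [Finset.mem_Ico, Sigma.forall, Finset.mem_sigma] <;>
  omega

-- Counting a predicate over list(range(a, b)) as a 0/1 Finset sum.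
theorem count_pyRange (a b : Int) (p : Int → Prop) [DecidablePred p] :
    ((PySem.List.pyRange a b 1).countP (fun x => decide (p x)) : Int)
      = ∑ x ∈ Finset.Ico a b, (if p x then (1:Int) else 0) := by
  rw [← PySem.List.sum_map_ite_one_zero, sum_pyRange]
  simp

-- ===== VERDICT (by name: the statement is the Claim_ definition above) =====
theorem answer_spec : Claim_equal_answer := by
  intro nums _
  unfold Spec_answer answer answer_alt
  simp only [PySem.List.foldl_ite_add_one, PySem.List.foldl_add, count_pyRange, sum_pyRange,
    zero_add, gt_iff_lt]
  rw [ico_swap]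
  refine Finset.sum_congr rfl (fun j hj => ?_)
  rw [Finset.sum_mul_sum]
  refine Finset.sum_congr rfl (fun i hi => ?_)
  refine Finset.sum_congr rfl (fun k hk => ?_)
  split_ifs <;> simp_all
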